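-- pv_equiv track=rewrite | github.com/junes7/python_algorithm | 프로그래머스/0/181926. 수 조작하기 1/수 조작하기 1.py | solution
-- ===== SOURCE A (Python) =====
-- def solution(n, control):
--     answer=n
--
--     for c in control:
--         if c=='w':
--             answer+=1
--         elif c=='s':
--             answer-=1
--         elif c=='d':
--             answer+=10
--         elif c=='a':
--             answer-=10
--     return answer
-- ===== SOURCE B (Python) =====
-- DELTA = {'w': 1, 's': -1, 'd': 10, 'a': -10}
--
-- def solution(n, control):
--     # divide-and-conquer: total adjustment of a slice = sum of its halves
--     def delta(lo, hi):
--         if hi - lo == 0: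
--             return 0
--         if hi - lo == 1:
--             return DELTA.get(control[lo], 0)
--         mid = (lo + hi) // 2
--         return delta(lo, mid) + delta(mid, hi)
--     return n + delta(0, len(control))
-- ===== Notes on version B (the rewrite author's own statement) =====
-- stated objective: alternative
-- what changed: Replaces the linear if/elif accumulation loop by a divide-and-conquer recursion that splits the control string in halves and sums each half's adjustment (single chars looked up in a delta table), correct because the total adjustment is additive over concatenation.
import Mathlib
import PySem

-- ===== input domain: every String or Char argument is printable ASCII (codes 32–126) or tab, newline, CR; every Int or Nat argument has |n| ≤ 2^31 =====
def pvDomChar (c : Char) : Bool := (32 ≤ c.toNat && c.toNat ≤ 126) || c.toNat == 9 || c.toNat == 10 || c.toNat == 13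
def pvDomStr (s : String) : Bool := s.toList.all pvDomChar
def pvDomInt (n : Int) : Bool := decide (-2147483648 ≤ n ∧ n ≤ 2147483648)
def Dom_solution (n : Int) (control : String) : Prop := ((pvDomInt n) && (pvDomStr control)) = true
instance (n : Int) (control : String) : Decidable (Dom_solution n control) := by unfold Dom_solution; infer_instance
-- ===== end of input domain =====

-- B replaces A's linear if/elif accumulation loop with a divide-and-conquer recursion
-- summing the adjustments of the two halves of the control string (objective: alternative decomposition).


-- ===== PORT A =====
def solution (n : Int) (control : String) : Int :=
  control.toList.foldl (fun answer c =>
    if c = 'w' then answer + 1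
    else if c = 's' then answer - 1
    else if c = 'd' then answer + 10
    else if c = 'a' then answer - 10
    else answer) n

-- ===== PORT B =====
-- DELTA table of Source B (dict lookup with default 0)
def pvDelta : PySem.Dict Char Int := PySem.Dict.ofList [('w', 1), ('s', -1), ('d', 10), ('a', -10)]

-- Source B's delta(lo, hi) on the sub-list of characters (divide-and-conquer halving);
-- the Nat fuel (= initial length) only guards totality, the 0-fuel branch is unreachable
def pvDeltaGo : Nat -> List Char -> Int
  | _, [] => 0
  | _, [c] => PySem.Dict.getD pvDelta c 0
  | 0, _ => 0
  | fuel + 1, l => pvDeltaGo fuel (l.take (l.length / 2)) + pvDeltaGo fuel (l.drop (l.length / 2))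

def pvDeltaRec (l : List Char) : Int := pvDeltaGo l.length l

def solution_alt (n : Int) (control : String) : Int :=
  n + pvDeltaRec control.toList

-- ===== PRECONDITION & SPEC =====
def Spec_solution (n : Int) (control : String) (out : Int) : Prop := out = solution_alt n control
instance (n : Int) (control : String) (out : Int) : Decidable (Spec_solution n control out) := by unfold Spec_solution; infer_instance

-- ===== CLAIM (what is proved, stated in full; the proofs are below) =====
def Claim_equal_solution : Prop := ∀ (n : Int) (control : String), Dom_solution n control → Spec_solution n control (solution n control)

-- ===== LEMMAS AND PROOFS =====

-- per-character delta (the branch cascade of A, as a function)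
def pvG (c : Char) : Int :=
  if c = 'w' then 1 else if c = 's' then -1 else if c = 'd' then 10 else if c = 'a' then -10 else 0

theorem single_eq (c : Char) : PySem.Dict.getD pvDelta c 0 = pvG c := by
  have hD : pvDelta = PySem.Dict.mk [('w', 1), ('s', -1), ('d', 10), ('a', -10)] := by decide
  by_cases hw : c = 'w'
  · subst hw; decide
  by_cases hs : c = 's'
  · subst hs; decide
  by_cases hd : c = 'd'
  · subst hd; decide
  by_cases ha : c = 'a'
  · subst ha; decide
  have hfind : List.find? (fun p => p.1 == c)
      ([('w', (1 : Int)), ('s', -1), ('d', 10), ('a', -10)]) = none := by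
    have bw : (('w' : Char) == c) = false := beq_eq_false_iff_ne.mpr (fun e => hw e.symm)
    have bs : (('s' : Char) == c) = false := beq_eq_false_iff_ne.mpr (fun e => hs e.symm)
    have bd : (('d' : Char) == c) = false := beq_eq_false_iff_ne.mpr (fun e => hd e.symm)
    have ba : (('a' : Char) == c) = false := beq_eq_false_iff_ne.mpr (fun e => ha e.symm)
    simp [List.find?, bw, bs, bd, ba]
  simp [pvG, hD, PySem.Dict.getD, PySem.Dict.get?, hfind, hw, hs, hd, ha]

theorem go_eq_sum (fuel : Nat) : ∀ l : List Char, l.length ≤ fuel →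
    pvDeltaGo fuel l = (l.map pvG).sum := by
  induction fuel with
  | zero =>
    intro l h
    have hl : l = [] := List.eq_nil_of_length_eq_zero (Nat.le_zero.mp h)
    subst hl; simp [pvDeltaGo]
  | succ f ih =>
    intro l h
    rcases l with _ | ⟨a, _ | ⟨b, t⟩⟩
    · simp [pvDeltaGo]
    · simpa [pvDeltaGo] using single_eq a
    · rw [show pvDeltaGo (f + 1) (a :: b :: t)
            = pvDeltaGo f ((a :: b :: t).take ((a :: b :: t).length / 2))
              + pvDeltaGo f ((a :: b :: t).drop ((a :: b :: t).length / 2)) from rfl]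
      have h1 : ((a :: b :: t).take ((a :: b :: t).length / 2)).length ≤ f := by
        simp only [List.length_take, List.length_cons] at *; omega
      have h2 : ((a :: b :: t).drop ((a :: b :: t).length / 2)).length ≤ f := by
        simp only [List.length_drop, List.length_cons] at *; omega
      rw [ih _ h1, ih _ h2, ← List.sum_append, ← List.map_append, List.take_append_drop]

theorem deltaRec_eq_sum (l : List Char) : pvDeltaRec l = (l.map pvG).sum :=
  go_eq_sum l.length l le_rfl

theorem foldl_eq_add_sum (l : List Char) : ∀ (n : Int),
    l.foldl (fun answer c =>
      if c = 'w' then answer + 1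
      else if c = 's' then answer - 1
      else if c = 'd' then answer + 10
      else if c = 'a' then answer - 10
      else answer) n = n + (l.map pvG).sum := by
  induction l with
  | nil => simp
  | cons h t ih =>
    intro n
    simp only [List.foldl_cons, ih, List.map_cons, List.sum_cons, pvG]
    split_ifs <;> ring

-- ===== VERDICT (by name: the statement is the Claim_ definition above) =====
theorem solution_spec : Claim_equal_solution := by
  intro n control _
  unfold Spec_solution solution solution_alt
  rw [foldl_eq_add_sum, deltaRec_eq_sum]
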